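-- pv_equiv track=rewrite | github.com/andersoncpdq/ia-cc-lesson2 | src/generic_functions.py | proximity_analysis
-- ===== SOURCE A (Python) =====
-- def proximity_analysis(str_lst, str_key, bias):
--     """
--     Realiza uma analise de proximidade de strings em uma lista de strings,
--     com base na string a ser analisada e o limiar de distancia de analise.
--
--     :param str_lst: lista de strings;
--     :param str_key: string de analise;
--     :param bias: limiar de distancia de analise;
--     :return: uma lista com as strings mais proximas da string de analise
--              (str_key) baseado no limiar de distancia (bias).
--     """
--     str_idx = [i for i, s in enumerate(str_lst) if s == str_key]
--     bias_idx = []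
--     for i in range(1, bias + 1):
--         for j in str_idx:
--             if (j - i >= 0) and (j - i not in bias_idx):
--                 bias_idx.append(j - i)
--             if (j + i <= len(str_lst) - 1) and (j + i not in bias_idx):
--                 bias_idx.append(j + i)
--     bias_idx.sort()
--     return [str_lst[k] for k in bias_idx]
-- ===== SOURCE B (Python) =====
-- def proximity_analysis(str_lst, str_key, bias):
--     """
--     One pass over positions: a position k is kept iff some occurrence of
--     str_key lies at distance between 1 and bias from k.  No index list is
--     built, deduplicated or sorted.
--     """
--     key_idx = [j for j, s in enumerate(str_lst) if s == str_key]
--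
--     def near(k):
--         return any(1 <= abs(k - j) <= bias for j in key_idx)
--
--     return [s for k, s in enumerate(str_lst) if near(k)]
-- ===== Notes on version B (the rewrite author's own statement) =====
-- stated objective: alternative
-- what changed: Instead of generating candidate indices distance-by-distance with list-membership deduplication and a final sort, B makes one pass over the positions and keeps position k iff some occurrence of str_key lies at distance 1..bias from it (output order is position order, so no sort or dedup is needed).
import Mathlib
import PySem

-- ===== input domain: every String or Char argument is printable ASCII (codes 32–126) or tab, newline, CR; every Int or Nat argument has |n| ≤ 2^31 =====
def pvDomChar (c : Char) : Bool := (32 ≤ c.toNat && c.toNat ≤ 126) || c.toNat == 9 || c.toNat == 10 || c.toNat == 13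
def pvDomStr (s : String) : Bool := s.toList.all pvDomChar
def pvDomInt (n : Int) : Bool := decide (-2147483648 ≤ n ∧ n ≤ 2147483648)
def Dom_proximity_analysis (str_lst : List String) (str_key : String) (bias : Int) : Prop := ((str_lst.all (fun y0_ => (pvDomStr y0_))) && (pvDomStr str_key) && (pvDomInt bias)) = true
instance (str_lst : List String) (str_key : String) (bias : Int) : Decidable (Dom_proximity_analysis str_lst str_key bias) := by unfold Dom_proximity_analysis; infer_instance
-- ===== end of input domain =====

-- B replaces A's distance-by-distance candidate generation (dedup by list membership, then sort)
-- by a single pass keeping each position within distance 1..bias of a key occurrence; return values proved equal.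

-- [i for i, s in enumerate(str_lst) if s == str_key] — the same line occurs in A and in B
def pvKeyIdx (str_lst : List String) (str_key : String) : List Int :=
  ((PySem.List.enumerate str_lst 0).filter (fun p => p.2 == str_key)).map (fun p => p.1)

-- ===== PORT A =====
-- the two guarded appends of one inner-loop iteration (the second `if` sees the possibly grown list, as in Python)
def pvStepA (n : Int) (i : Int) (acc : List Int) (j : Int) : List Int :=
  let acc1 := if 0 ≤ j - i ∧ j - i ∉ acc then acc ++ [j - i] else acc
  if j + i ≤ n - 1 ∧ j + i ∉ acc1 then acc1 ++ [j + i] else acc1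

def proximity_analysis (str_lst : List String) (str_key : String) (bias : Int) : List String :=
  -- indices appended to bias_idx are always in range, so Python's str_lst[k] never raises; pyGetD is exact here
  (PySem.List.sorted
      ((PySem.List.pyRange 1 (bias + 1) 1).foldl
        (fun acc i => (pvKeyIdx str_lst str_key).foldl (pvStepA (str_lst.length : Int) i) acc) [])
      (fun x => x) false).map
    (fun k => PySem.List.pyGetD str_lst k "")

-- ===== PORT B =====
def pvNearB (key_idx : List Int) (bias : Int) (k : Int) : Bool :=
  key_idx.any (fun j => decide (1 ≤ |k - j| ∧ |k - j| ≤ bias))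

def proximity_analysis_alt (str_lst : List String) (str_key : String) (bias : Int) : List String :=
  ((PySem.List.enumerate str_lst 0).filter
      (fun p => pvNearB (pvKeyIdx str_lst str_key) bias p.1)).map (fun p => p.2)

-- ===== PRECONDITION & SPEC =====
def Spec_proximity_analysis (str_lst : List String) (str_key : String) (bias : Int) (out : List String) : Prop := out = proximity_analysis_alt str_lst str_key bias
instance (str_lst : List String) (str_key : String) (bias : Int) (out : List String) : Decidable (Spec_proximity_analysis str_lst str_key bias out) := by unfold Spec_proximity_analysis; infer_instance

-- ===== CLAIM (what is proved, stated in full; the proofs are below) =====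
def Claim_equal_proximity_analysis : Prop := ∀ (str_lst : List String) (str_key : String) (bias : Int), Dom_proximity_analysis str_lst str_key bias → Spec_proximity_analysis str_lst str_key bias (proximity_analysis str_lst str_key bias)

-- ===== LEMMAS AND PROOFS =====

-- one guarded, deduplicating append
theorem pvGuardApp_nodup (acc : List Int) (c : Prop) [Decidable c] (a : Int) (h : acc.Nodup) :
    (if c ∧ a ∉ acc then acc ++ [a] else acc).Nodup := by
  split_ifs with hc
  · simp [List.nodup_append, h]
    exact fun b hb hba => hc.2 (hba ▸ hb)
  · exact h

theorem pvGuardApp_mem (acc : List Int) (c : Prop) [Decidable c] (a x : Int) :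
    (x ∈ if c ∧ a ∉ acc then acc ++ [a] else acc) ↔ x ∈ acc ∨ (x = a ∧ c) := by
  split_ifs with hc
  · simp only [List.mem_append, List.mem_singleton]
    constructor
    · rintro (h | rfl)
      · exact Or.inl h
      · exact Or.inr ⟨rfl, hc.1⟩
    · rintro (h | ⟨rfl, -⟩)
      · exact Or.inl h
      · exact Or.inr rfl
  · constructor
    · exact Or.inl
    · rintro (h | ⟨rfl, hc'⟩)
      · exact h
      · rcases not_and_or.mp hc with h' | h'
        · exact absurd hc' h'
        · exact not_not.mp h'

theorem pvStepA_nodup (n i : Int) (acc : List Int) (j : Int) (h : acc.Nodup) :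
    (pvStepA n i acc j).Nodup := by
  unfold pvStepA
  exact pvGuardApp_nodup _ _ _ (pvGuardApp_nodup _ _ _ h)

theorem pvStepA_mem (n i : Int) (acc : List Int) (j x : Int) :
    x ∈ pvStepA n i acc j ↔
      x ∈ acc ∨ (x = j - i ∧ 0 ≤ j - i) ∨ (x = j + i ∧ j + i ≤ n - 1) := by
  unfold pvStepA
  rw [pvGuardApp_mem, pvGuardApp_mem]
  tauto

-- inner fold over str_idx: keeps Nodup, and adds exactly the guarded j±i candidates
theorem pvInnerFold (n i : Int) (sidx : List Int) (acc : List Int) (hnd : acc.Nodup) :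
    (sidx.foldl (pvStepA n i) acc).Nodup ∧
    (∀ x, x ∈ sidx.foldl (pvStepA n i) acc ↔
      x ∈ acc ∨ ∃ j ∈ sidx, (x = j - i ∧ 0 ≤ j - i) ∨ (x = j + i ∧ j + i ≤ n - 1)) := by
  induction sidx generalizing acc with
  | nil => simpa using hnd
  | cons j t ih =>
    obtain ⟨ihn, ihm⟩ := ih (pvStepA n i acc j) (pvStepA_nodup n i acc j hnd)
    refine ⟨ihn, fun x => ?_⟩
    rw [List.foldl_cons, ihm x, pvStepA_mem]
    simp only [List.mem_cons]
    constructor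
    · rintro ((h | h) | ⟨j', hj', hc⟩)
      · exact Or.inl h
      · exact Or.inr ⟨j, Or.inl rfl, h⟩
      · exact Or.inr ⟨j', Or.inr hj', hc⟩
    · rintro (h | ⟨j', (rfl | hj'), hc⟩)
      · exact Or.inl (Or.inl h)
      · exact Or.inl (Or.inr hc)
      · exact Or.inr ⟨j', hj', hc⟩

-- outer fold over the distance range
theorem pvOuterFold (n : Int) (sidx : List Int) (rng : List Int) (acc : List Int) (hnd : acc.Nodup) :
    (rng.foldl (fun acc i => sidx.foldl (pvStepA n i) acc) acc).Nodup ∧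
    (∀ x, x ∈ rng.foldl (fun acc i => sidx.foldl (pvStepA n i) acc) acc ↔
      x ∈ acc ∨ ∃ i ∈ rng, ∃ j ∈ sidx, (x = j - i ∧ 0 ≤ j - i) ∨ (x = j + i ∧ j + i ≤ n - 1)) := by
  induction rng generalizing acc with
  | nil => simpa using hnd
  | cons i t ih =>
    obtain ⟨inn, inm⟩ := pvInnerFold n i sidx acc hnd
    obtain ⟨ihn, ihm⟩ := ih (sidx.foldl (pvStepA n i) acc) inn
    refine ⟨ihn, fun x => ?_⟩
    rw [List.foldl_cons, ihm x, inm x]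
    simp only [List.mem_cons]
    constructor
    · rintro ((h | ⟨j, hj, hc⟩) | ⟨i', hi', hrest⟩)
      · exact Or.inl h
      · exact Or.inr ⟨i, Or.inl rfl, j, hj, hc⟩
      · exact Or.inr ⟨i', Or.inr hi', hrest⟩
    · rintro (h | ⟨i', (rfl | hi'), j, hj, hc⟩)
      · exact Or.inl (Or.inl h)
      · exact Or.inl (Or.inr ⟨j, hj, hc⟩)
      · exact Or.inr ⟨i', hi', j, hj, hc⟩

-- elements of the key-index list are genuine positions of str_lst
theorem pvKeyIdx_bounds (str_lst : List String) (str_key : String) (j : Int)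
    (hj : j ∈ pvKeyIdx str_lst str_key) :
    0 ≤ j ∧ j ≤ (str_lst.length : Int) - 1 := by
  unfold pvKeyIdx at hj
  simp only [List.mem_map, List.mem_filter] at hj
  obtain ⟨p, ⟨hp, -⟩, rfl⟩ := hj
  rw [PySem.List.mem_enumerate_iff] at hp
  obtain ⟨k, hk, rfl⟩ := hp
  simp only
  omega

-- the guarded-candidate condition of A is B's distance test, for positions 0 ≤ x < n
theorem pvPredIff (n bias : Int) (kidx : List Int)
    (hb : ∀ j ∈ kidx, 0 ≤ j ∧ j ≤ n - 1) (x : Int) :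
    (∃ i ∈ PySem.List.pyRange 1 (bias + 1) 1, ∃ j ∈ kidx,
        (x = j - i ∧ 0 ≤ j - i) ∨ (x = j + i ∧ j + i ≤ n - 1)) ↔
      (0 ≤ x ∧ x < n ∧ pvNearB kidx bias x = true) := by
  unfold pvNearB
  simp only [List.any_eq_true, decide_eq_true_eq, PySem.List.mem_pyRange_one]
  constructor
  · rintro ⟨i, ⟨hi1, hi2⟩, j, hj, (⟨rfl, hg⟩ | ⟨rfl, hg⟩)⟩ <;>
      obtain ⟨hj0, hjn⟩ := hb j hj
    · refine ⟨by omega, by omega, j, hj, ?_⟩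
      rw [abs_of_nonpos (by omega : j - i - j ≤ (0:Int))]
      constructor <;> omega
    · refine ⟨by omega, by omega, j, hj, ?_⟩
      rw [abs_of_nonneg (by omega : (0:Int) ≤ j + i - j)]
      constructor <;> omega
  · rintro ⟨hx0, hxn, j, hj, h1, h2⟩
    obtain ⟨hj0, hjn⟩ := hb j hj
    rcases abs_cases (x - j) with ⟨he, hs⟩ | ⟨he, hs⟩
    · exact ⟨x - j, ⟨by omega, by omega⟩, j, hj, Or.inr ⟨by omega, by omega⟩⟩
    · exact ⟨j - x, ⟨by omega, by omega⟩, j, hj, Or.inl ⟨by omega, by omega⟩⟩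

-- ===== VERDICT (by name: the statement is the Claim_ definition above) =====
theorem proximity_analysis_spec : Claim_equal_proximity_analysis := by
  intro str_lst str_key bias _
  unfold Spec_proximity_analysis proximity_analysis proximity_analysis_alt
  have hb : ∀ j ∈ pvKeyIdx str_lst str_key, 0 ≤ j ∧ j ≤ (str_lst.length : Int) - 1 :=
    fun j hj => pvKeyIdx_bounds str_lst str_key j hj
  -- A's sorted dedup index list is the increasing enumeration of B's kept positions
  have hsorted :
      PySem.List.sorted
        ((PySem.List.pyRange 1 (bias + 1) 1).foldl
          (fun acc i => (pvKeyIdx str_lst str_key).foldl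
            (pvStepA (str_lst.length : Int) i) acc) []) (fun x => x) false
        = (PySem.List.pyRange 0 (str_lst.length : Int) 1).filter
            (fun k => pvNearB (pvKeyIdx str_lst str_key) bias k) := by
    obtain ⟨hnd, hmem⟩ := pvOuterFold (str_lst.length : Int) (pvKeyIdx str_lst str_key)
      (PySem.List.pyRange 1 (bias + 1) 1) [] List.nodup_nil
    apply PySem.List.sorted_eq_of_perm_of_pairwise_lt
    · refine (List.perm_ext_iff_of_nodup ((PySem.List.nodup_pyRange_one 0 _).filter _) hnd).mpr ?_
      intro x
      rw [hmem x, pvPredIff (str_lst.length : Int) bias (pvKeyIdx str_lst str_key) hb x]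
      simp only [List.mem_filter, PySem.List.mem_pyRange_one, List.not_mem_nil, false_or]
      tauto
    · exact (PySem.List.pairwise_lt_pyRange_one 0 _).filter _
  rw [hsorted, PySem.List.enumerate_eq_map_pyRange str_lst "", List.filter_map, List.map_map]
  rfl
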